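-- pv_equiv track=rewrite | github.com/Emilien-Etadam/translate-book-skill | scripts/glossary.py | _dedupe_casefold
-- ===== SOURCE A (Python) =====
-- from collections import Counter, defaultdict
-- from typing import Dict, Iterable, List, Tuple
--
-- def _dedupe_casefold(terms: Iterable[Tuple[str, int]]) -> Dict[str, Tuple[str, int]]:
--     """Fusionne par casefold ; fréquences additionnées ; affichage préfère la forme la plus « titre »."""
--     by_cf: Dict[str, List[Tuple[str, int]]] = defaultdict(list)
--     for term, freq in terms:
--         if not term or not term.strip():
--             continue
--         t = term.strip()
--         by_cf[t.casefold()].append((t, freq))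
--     merged: Dict[str, Tuple[str, int]] = {}
--     for cf, items in by_cf.items():
--         # Même lemme peut venir des n-grammes normalisés et de l'heuristique nom propre : ne pas additionner.
--         total = max(f for _, f in items)
--         best = max(
--             items,
--             key=lambda x: (
--                 sum(1 for c in x[0] if c.isupper()),
--                 x[1],
--                 len(x[0]),
--             ),
--         )[0]
--         merged[cf] = (best, total)
--     return merged
-- ===== SOURCE B (Python) =====
-- def _dedupe_casefold(terms):
--     """Single-pass aggregation: one dict cf -> (best_form, best_key, max_freq)."""
--     state = {}
--     for term, freq in terms:
--         t = term.strip()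
--         if not t:
--             continue
--         cf = t.casefold()
--         key = (sum(1 for c in t if c.isupper()), freq, len(t))
--         cur = state.get(cf)
--         if cur is None:
--             state[cf] = (t, key, freq)
--         else:
--             best, bkey, mf = cur
--             if key > bkey:
--                 best, bkey = t, key
--             state[cf] = (best, bkey, max(mf, freq))
--     return {cf: (best, mf) for cf, (best, _bkey, mf) in state.items()}
-- ===== Notes on version B (the rewrite author's own statement) =====
-- stated objective: alternative
-- what changed: Replaces A's two-phase group-then-reduce (build cf -> list of all items, then run max twice over each group) by a single pass that keeps one running (best_form, best_key, max_freq) triple per casefold key, so no intermediate per-group lists are built and no second scan over groups is needed.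
import Mathlib
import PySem

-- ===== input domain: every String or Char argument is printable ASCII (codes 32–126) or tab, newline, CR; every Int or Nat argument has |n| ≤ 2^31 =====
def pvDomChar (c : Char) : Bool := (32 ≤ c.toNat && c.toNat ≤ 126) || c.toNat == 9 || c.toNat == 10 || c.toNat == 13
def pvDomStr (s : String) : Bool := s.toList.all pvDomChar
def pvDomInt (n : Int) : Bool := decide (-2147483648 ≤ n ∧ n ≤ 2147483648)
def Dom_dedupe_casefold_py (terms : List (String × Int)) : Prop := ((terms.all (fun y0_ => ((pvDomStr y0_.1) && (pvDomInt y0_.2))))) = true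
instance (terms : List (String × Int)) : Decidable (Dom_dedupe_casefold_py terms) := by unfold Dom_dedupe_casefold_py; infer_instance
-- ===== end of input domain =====

-- B replaces A's two-phase group-then-reduce (cf -> list of all items, then two max scans per group)
-- by a single pass holding one running (best_form, best_key, max_freq) triple per casefold key.
-- casefold is ported as PySem.Str.lower: exact on the ASCII strings Dom_ admits.

-- shared helper: Python's comparison key (sum(1 for c in t if c.isupper()), freq, len(t)) as an Int triple
def pvKey (x : String × Int) : Int × Int × Int :=
  (((x.1.toList.countP PySem.Chars.isupper : Nat) : Int), x.2, PySem.Str.len x.1)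

-- shared helper: strict lexicographic '>' on the triple (Python tuple comparison)
def pvKeyGt (a b : Int × Int × Int) : Bool :=
  b.1 < a.1 || (a.1 == b.1 && (b.2.1 < a.2.1 || (a.2.1 == b.2.1 && b.2.2 < a.2.2)))

-- ===== PORT A =====
-- max(items, key=…) ported as Python's first-maximal fold: replace only on strictly greater key.
def pvPyMax (its : List (String × Int)) : String × Int :=
  match its with
  | [] => ("", 0)  -- unreachable: every group is nonempty
  | h :: t => t.foldl (fun cur y => if pvKeyGt (pvKey y) (pvKey cur) then y else cur) h

def dedupe_casefold_py (terms : List (String × Int)) : List (String × String × Int) :=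
  let by_cf : PySem.Dict String (List (String × Int)) :=
    terms.foldl (fun d p =>
      if p.1 == "" || PySem.Str.strip p.1 == "" then d
      else
        d.modify (PySem.Str.lower (PySem.Str.strip p.1)) []
          (fun l => l ++ [(PySem.Str.strip p.1, p.2)])) PySem.Dict.empty
  (by_cf.items.foldl (fun m ci =>
      m.insert ci.1
        ((pvPyMax ci.2).1,
         (PySem.List.max? (ci.2.map (fun x => x.2)) (fun y => y)).getD 0))
    PySem.Dict.empty).items

-- ===== PORT B =====
-- B-side helper: merge one new (t, key, freq) into the running triple (best, bkey, maxfreq)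
def pvUpd (s : String × (Int × Int × Int) × Int) (t : String) (key : Int × Int × Int)
    (freq : Int) : String × (Int × Int × Int) × Int :=
  if pvKeyGt key s.2.1 then (t, key, max s.2.2 freq) else (s.1, s.2.1, max s.2.2 freq)

def dedupe_casefold_py_alt (terms : List (String × Int)) : List (String × String × Int) :=
  (terms.foldl (fun d p =>
      if PySem.Str.strip p.1 == "" then d
      else
        match d.get? (PySem.Str.lower (PySem.Str.strip p.1)) with
        | none => d.insert (PySem.Str.lower (PySem.Str.strip p.1))
            (PySem.Str.strip p.1, pvKey (PySem.Str.strip p.1, p.2), p.2)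
        | some s => d.insert (PySem.Str.lower (PySem.Str.strip p.1))
            (pvUpd s (PySem.Str.strip p.1) (pvKey (PySem.Str.strip p.1, p.2)) p.2))
    (PySem.Dict.empty : PySem.Dict String (String × (Int × Int × Int) × Int))).items.map
    (fun q => (q.1, q.2.1, q.2.2.2))

-- ===== PRECONDITION & SPEC =====
def Spec_dedupe_casefold_py (terms : List (String × Int)) (out : List (String × String × Int)) : Prop := out = dedupe_casefold_py_alt terms
instance (terms : List (String × Int)) (out : List (String × String × Int)) : Decidable (Spec_dedupe_casefold_py terms out) := by unfold Spec_dedupe_casefold_py; infer_instance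

-- ===== CLAIM (what is proved, stated in full; the proofs are below) =====
def Claim_equal_dedupe_casefold_py : Prop := ∀ (terms : List (String × Int)), Dom_dedupe_casefold_py terms → Spec_dedupe_casefold_py terms (dedupe_casefold_py terms)

-- ===== LEMMAS AND PROOFS =====

-- the aggregate B maintains, as a function of the full group A collects
def pvAgg (its : List (String × Int)) : String × (Int × Int × Int) × Int :=
  match its with
  | [] => ("", (0, 0, 0), 0)
  | h :: t => t.foldl (fun s y => pvUpd s y.1 (pvKey y) y.2) (h.1, pvKey h, h.2)

lemma pvAgg_append (its : List (String × Int)) (x : String × Int) (h : its ≠ []) :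
    pvAgg (its ++ [x]) = pvUpd (pvAgg its) x.1 (pvKey x) x.2 := by
  cases its with
  | nil => exact absurd rfl h
  | cons a t => simp [pvAgg, List.foldl_append]

lemma get?_map_val {ν₁ ν₂ : Type} (g : ν₁ → ν₂) (l : List (String × ν₁)) (k : String) :
    (PySem.Dict.mk (l.map (fun p => (p.1, g p.2)))).get? k
      = ((PySem.Dict.mk l).get? k).map g := by
  induction l with
  | nil => rfl
  | cons p t ih =>
    obtain ⟨pk, pv⟩ := p
    simp only [List.map_cons, PySem.Dict.get?_mk_cons]
    by_cases hk : (pk == k) = true <;> simp [hk, ih]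

lemma strip_empty : PySem.Str.strip "" = "" := by decide

-- proof-side names for the two fold bodies (definitionally equal to the ports' lambdas)
def pvStepA (d : PySem.Dict String (List (String × Int))) (p : String × Int) :
    PySem.Dict String (List (String × Int)) :=
  if p.1 == "" || PySem.Str.strip p.1 == "" then d
  else
    d.modify (PySem.Str.lower (PySem.Str.strip p.1)) []
      (fun l => l ++ [(PySem.Str.strip p.1, p.2)])

def pvStepB (d : PySem.Dict String (String × (Int × Int × Int) × Int)) (p : String × Int) :
    PySem.Dict String (String × (Int × Int × Int) × Int) :=
  if PySem.Str.strip p.1 == "" then d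
  else
    match d.get? (PySem.Str.lower (PySem.Str.strip p.1)) with
    | none => d.insert (PySem.Str.lower (PySem.Str.strip p.1))
        (PySem.Str.strip p.1, pvKey (PySem.Str.strip p.1, p.2), p.2)
    | some s => d.insert (PySem.Str.lower (PySem.Str.strip p.1))
        (pvUpd s (PySem.Str.strip p.1) (pvKey (PySem.Str.strip p.1, p.2)) p.2)

def pvG (q : String × List (String × Int)) : String × (String × (Int × Int × Int) × Int) :=
  (q.1, pvAgg q.2)

-- B's running triple along a group equals (Python-max element's form, its key, running max of freqs)
lemma pvAgg_fold (t : List (String × Int)) : ∀ (c : String × Int) (m : Int),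
    t.foldl (fun s y => pvUpd s y.1 (pvKey y) y.2) (c.1, pvKey c, m)
      = ((t.foldl (fun cur y => if pvKeyGt (pvKey y) (pvKey cur) then y else cur) c).1,
         pvKey (t.foldl (fun cur y => if pvKeyGt (pvKey y) (pvKey cur) then y else cur) c),
         t.foldl (fun a y => max a y.2) m) := by
  induction t with
  | nil => intro c m; rfl
  | cons y t ih =>
    intro c m
    simp only [List.foldl_cons]
    by_cases h : pvKeyGt (pvKey y) (pvKey c) = true
    · rw [show pvUpd (c.1, pvKey c, m) y.1 (pvKey y) y.2 = (y.1, pvKey y, max m y.2) from by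
        simp [pvUpd, h], if_pos h]
      exact ih y (max m y.2)
    · rw [show pvUpd (c.1, pvKey c, m) y.1 (pvKey y) y.2 = (c.1, pvKey c, max m y.2) from by
        simp [pvUpd, h], if_neg h]
      exact ih c (max m y.2)

-- the loop invariant: B's dict is the pvAgg-image of A's group dict
lemma pvInv (terms : List (String × Int)) :
    ∀ (lA : List (String × List (String × Int))),
    (∀ p ∈ lA, p.2 ≠ []) → (lA.map Prod.fst).Nodup →
    ((terms.foldl pvStepB (PySem.Dict.mk (lA.map pvG))).items
        = (terms.foldl pvStepA (PySem.Dict.mk lA)).items.map pvG)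
      ∧ (∀ p ∈ (terms.foldl pvStepA (PySem.Dict.mk lA)).items, p.2 ≠ [])
      ∧ ((terms.foldl pvStepA (PySem.Dict.mk lA)).items.map Prod.fst).Nodup := by
  induction terms with
  | nil => intro lA hne hnd; exact ⟨rfl, hne, hnd⟩
  | cons p terms ih =>
    intro lA hne hnd
    simp only [List.foldl_cons]
    by_cases hs : (PySem.Str.strip p.1 == "") = true
    · have hA : pvStepA (PySem.Dict.mk lA) p = PySem.Dict.mk lA := by
        simp [pvStepA, hs]
      have hB : pvStepB (PySem.Dict.mk (lA.map pvG)) p = PySem.Dict.mk (lA.map pvG) := by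
        simp [pvStepB, hs]
      rw [hA, hB]; exact ih lA hne hnd
    · have hp1 : (p.1 == "") = false := by
        cases hq : (p.1 == "") with
        | false => rfl
        | true =>
          exfalso
          rw [beq_iff_eq] at hq
          rw [hq, strip_empty] at hs
          exact hs rfl
      have hsf : (PySem.Str.strip p.1 == "") = false := by
        cases h : (PySem.Str.strip p.1 == "") with
        | false => rfl
        | true => exact absurd h hs
      have hA0 : pvStepA (PySem.Dict.mk lA) p
          = (PySem.Dict.mk lA).insert (PySem.Str.lower (PySem.Str.strip p.1))
              ((PySem.Dict.mk lA).getD (PySem.Str.lower (PySem.Str.strip p.1)) []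
                ++ [(PySem.Str.strip p.1, p.2)]) := by
        simp only [pvStepA, hp1, hsf, Bool.or_self, Bool.false_eq_true, if_false]
        rfl
      cases hget : (PySem.Dict.mk lA).get? (PySem.Str.lower (PySem.Str.strip p.1)) with
      | none =>
        have hcA : (PySem.Dict.mk lA).contains (PySem.Str.lower (PySem.Str.strip p.1)) = false := by
          rw [PySem.Dict.contains_eq_isSome_get?, hget]; rfl
        have hgB : (PySem.Dict.mk (lA.map pvG)).get? (PySem.Str.lower (PySem.Str.strip p.1)) = none := by
          rw [show (lA.map pvG) = lA.map (fun q => (q.1, pvAgg q.2)) from rfl, get?_map_val, hget]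
          rfl
        have hnotmem : PySem.Str.lower (PySem.Str.strip p.1) ∉ lA.map Prod.fst := by
          intro hmem
          rw [show (lA.map Prod.fst) = (PySem.Dict.mk lA).keys from rfl] at hmem
          rw [← PySem.Dict.contains_iff_mem_keys] at hmem
          rw [hcA] at hmem
          exact Bool.false_ne_true hmem
        have hA : pvStepA (PySem.Dict.mk lA) p
            = PySem.Dict.mk (lA ++ [(PySem.Str.lower (PySem.Str.strip p.1),
                [(PySem.Str.strip p.1, p.2)])]) := by
          apply PySem.Dict.ext
          rw [hA0, PySem.Dict.getD_eq_get?_getD, hget, Option.getD_none, PySem.Dict.items_insert]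
          simp [hcA]
        have hB : pvStepB (PySem.Dict.mk (lA.map pvG)) p
            = PySem.Dict.mk ((lA ++ [(PySem.Str.lower (PySem.Str.strip p.1),
                [(PySem.Str.strip p.1, p.2)])]).map pvG) := by
          apply PySem.Dict.ext
          have hcB : (PySem.Dict.mk (lA.map pvG)).contains (PySem.Str.lower (PySem.Str.strip p.1)) = false := by
            rw [PySem.Dict.contains_eq_isSome_get?, hgB]; rfl
          simp only [pvStepB, hsf, if_false, Bool.false_eq_true, hgB]
          rw [PySem.Dict.items_insert]
          simp [hcB, pvG, pvAgg]
        rw [hA, hB]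
        apply ih
        · intro q hq
          rcases List.mem_append.mp hq with h | h
          · exact hne q h
          · simp at h; subst h; simp
        · simp only [List.map_append, List.map_cons, List.map_nil]
          rw [List.nodup_append]
          refine ⟨hnd, List.nodup_singleton _, ?_⟩
          intro a ha b hb
          simp only [List.mem_singleton] at hb
          subst hb
          intro hab
          exact hnotmem (hab ▸ ha)
      | some v =>
        have hmemv : (PySem.Str.lower (PySem.Str.strip p.1), v) ∈ lA :=
          PySem.Dict.mem_items_of_get?_eq_some _ hget
        have hvne : v ≠ [] := hne _ hmemv
        have hcA : (PySem.Dict.mk lA).contains (PySem.Str.lower (PySem.Str.strip p.1)) = true := by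
          rw [PySem.Dict.contains_eq_isSome_get?, hget]; rfl
        have hgB : (PySem.Dict.mk (lA.map pvG)).get? (PySem.Str.lower (PySem.Str.strip p.1))
            = some (pvAgg v) := by
          rw [show (lA.map pvG) = lA.map (fun q => (q.1, pvAgg q.2)) from rfl, get?_map_val, hget]
          rfl
        have hA : pvStepA (PySem.Dict.mk lA) p
            = PySem.Dict.mk (lA.map (fun q =>
                if q.1 == PySem.Str.lower (PySem.Str.strip p.1)
                then (PySem.Str.lower (PySem.Str.strip p.1), v ++ [(PySem.Str.strip p.1, p.2)])
                else q)) := by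
          apply PySem.Dict.ext
          rw [hA0, PySem.Dict.getD_eq_get?_getD, hget, Option.getD_some, PySem.Dict.items_insert]
          simp [hcA]
        have hB : pvStepB (PySem.Dict.mk (lA.map pvG)) p
            = PySem.Dict.mk ((lA.map (fun q =>
                if q.1 == PySem.Str.lower (PySem.Str.strip p.1)
                then (PySem.Str.lower (PySem.Str.strip p.1), v ++ [(PySem.Str.strip p.1, p.2)])
                else q)).map pvG) := by
          apply PySem.Dict.ext
          have hcB : (PySem.Dict.mk (lA.map pvG)).contains (PySem.Str.lower (PySem.Str.strip p.1)) = true := by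
            rw [PySem.Dict.contains_eq_isSome_get?, hgB]; rfl
          simp only [pvStepB, hsf, if_false, Bool.false_eq_true, hgB]
          rw [PySem.Dict.items_insert]
          simp only [hcB, if_true]
          have hupd : pvUpd (pvAgg v) (PySem.Str.strip p.1)
              (pvKey (PySem.Str.strip p.1, p.2)) p.2
              = pvAgg (v ++ [(PySem.Str.strip p.1, p.2)]) :=
            (pvAgg_append v (PySem.Str.strip p.1, p.2) hvne).symm
          rw [hupd]
          simp only [List.map_map]
          apply List.map_congr_left
          intro q _
          by_cases hq : (q.1 == PySem.Str.lower (PySem.Str.strip p.1)) = true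
          · simp [Function.comp, pvG, hq]
          · simp [Function.comp, pvG, hq]
        rw [hA, hB]
        apply ih
        · intro q hq
          rcases List.mem_map.mp hq with ⟨r, hr, hrq⟩
          by_cases h1 : (r.1 == PySem.Str.lower (PySem.Str.strip p.1)) = true
          · rw [if_pos h1] at hrq; subst hrq; simp
          · rw [if_neg h1] at hrq; subst hrq; exact hne r hr
        · have : (lA.map (fun q =>
              if q.1 == PySem.Str.lower (PySem.Str.strip p.1)
              then (PySem.Str.lower (PySem.Str.strip p.1), v ++ [(PySem.Str.strip p.1, p.2)])
              else q)).map Prod.fst = lA.map Prod.fst := by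
            simp only [List.map_map]
            apply List.map_congr_left
            intro q _
            by_cases hq : (q.1 == PySem.Str.lower (PySem.Str.strip p.1)) = true
            · simp only [Function.comp, if_pos hq]
              exact (beq_iff_eq.mp hq).symm
            · simp [Function.comp, hq]
          rw [this]; exact hnd

-- per-group: A's (best, total) pair is the projection of B's running triple
lemma pvFinal (its : List (String × Int)) (h : its ≠ []) :
    ((pvPyMax its).1,
     (PySem.List.max? (its.map (fun x => x.2)) (fun y => y)).getD 0)
      = ((pvAgg its).1, (pvAgg its).2.2) := by
  cases its with
  | nil => exact absurd rfl h
  | cons a t =>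
    have hagg : pvAgg (a :: t)
        = ((t.foldl (fun cur y => if pvKeyGt (pvKey y) (pvKey cur) then y else cur) a).1,
           pvKey (t.foldl (fun cur y => if pvKeyGt (pvKey y) (pvKey cur) then y else cur) a),
           t.foldl (fun acc y => max acc y.2) a.2) := by
      show t.foldl (fun s y => pvUpd s y.1 (pvKey y) y.2) (a.1, pvKey a, a.2) = _
      exact pvAgg_fold t a a.2
    rw [hagg]
    simp only [pvPyMax, List.map_cons, PySem.List.max?_id_cons, Option.getD_some, List.foldl_map]

-- ===== VERDICT (by name: the statement is the Claim_ definition above) =====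
theorem dedupe_casefold_py_spec : Claim_equal_dedupe_casefold_py := by
  intro terms _
  unfold Spec_dedupe_casefold_py
  obtain ⟨h1, h2, h3⟩ := pvInv terms [] (by simp) (by simp)
  show (((terms.foldl pvStepA (PySem.Dict.mk [])).items.foldl (fun m ci =>
      m.insert ci.1
        ((pvPyMax ci.2).1,
         (PySem.List.max? (ci.2.map (fun x => x.2)) (fun y => y)).getD 0))
    PySem.Dict.empty).items)
    = (terms.foldl pvStepB (PySem.Dict.mk (([] : List (String × List (String × Int))).map pvG))).items.map
        (fun q => (q.1, q.2.1, q.2.2.2))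
  rw [h1, List.map_map]
  have h4 := PySem.Dict.items_foldl_insert_fresh
    ((terms.foldl pvStepA (PySem.Dict.mk [])).items) (fun ci => ci.1)
    (fun ci => ((pvPyMax ci.2).1,
      (PySem.List.max? (ci.2.map (fun x => x.2)) (fun y => y)).getD 0)) PySem.Dict.empty
    (fun a _ => PySem.Dict.contains_empty _) h3
  rw [h4]
  apply List.map_congr_left
  intro ci hci
  have := pvFinal ci.2 (h2 ci hci)
  simp only [Function.comp, pvG]
  rw [Prod.ext_iff] at this
  exact Prod.ext rfl (Prod.ext this.1 this.2)
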